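-- pv_equiv track=rewrite | github.com/nseeuws/EventBasedModeling | eventnet/evaluation.py | ovlp_scoring
-- ===== SOURCE A (Python) =====
-- from typing import List, Tuple
--
-- ListOfEvents = List[Tuple[int, int]]  # Type hint for a list of events (start-stop tuple)
--
-- def ovlp_scoring(
--         reference_list: ListOfEvents, hypothesis_list: ListOfEvents
-- ) -> Tuple[int, int, int]:
--     """
--     Compute hits, misses, and false alarms under the "OVLP" criterion
--     Based on the TUH Corpus evaluation code: https://isip.piconepress.com/projects/tuh_eeg/downloads/nedc_eval_eeg/
--     :param reference_list: List of reference, ground-truth events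
--     :param hypothesis_list: List of hypothesis, predicted events
--     :return: Tuple of integers, counts of hits, misses, and false alarms (in that order)
--     """
--
--     hit = 0  # Hit count
--     miss = 0  # Miss count
--     fa = 0  # False alarm count
--
--     for event in reference_list:
--         starts, stops = get_ovlp_events(
--             start=event[0], stop=event[1], event_list=hypothesis_list
--         )
--         if len(starts) > 0:
--             hit += 1
--         else:
--             miss += 1
--
--     for event in hypothesis_list:
--         starts, stops = get_ovlp_events(
--             start=event[0], stop=event[1], event_list=reference_list
--         )
--         if len(starts) == 0:
--             fa += 1
--
--     return hit, miss, fa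
--
-- def get_ovlp_events(
--         start: int, stop: int, event_list: ListOfEvents
-- ) -> Tuple[List[int], List[int]]:
--     """
--     Helper function for `ovlp_scoring`
--     Returns the events in `event_list` that overlap with an event at `start, stop`
--     :param start: Start index of the "test event"
--     :param stop: Stop index of the "test event"
--     :param event_list: List of events to test against
--     :return: Lists of starts and stops in `event_list` that overlap with `(start, stop)`
--     """
--     list_of_starts = []
--     list_of_stops = []
--
--     for event in event_list:
--         if (event[1] > start) and (event[0] < stop):
--             list_of_starts.append(event[0])
--             list_of_stops.append(event[1])
--
--     return list_of_starts, list_of_stops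
-- ===== SOURCE B (Python) =====
-- from typing import List, Tuple
--
-- ListOfEvents = List[Tuple[int, int]]
--
--
-- def _sweep_hits(queries: ListOfEvents, events: ListOfEvents) -> int:
--     """Number of queries (s, e) that overlap some event (a, b), i.e. b > s and a < e.
--
--     Sort queries by stop and events by start; one pointer sweeps the events once,
--     keeping the maximum event stop among events whose start is below the current
--     query stop.  A query is a hit iff that maximum exceeds its start.
--     """
--     qs = sorted(queries, key=lambda q: q[1])
--     ev = sorted(events, key=lambda x: x[0])
--     hits = 0
--     j = 0
--     best = None  # max stop among events already passed by the pointer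
--     for s, e in qs:
--         while j < len(ev) and ev[j][0] < e:
--             b = ev[j][1]
--             if best is None or b > best:
--                 best = b
--             j += 1
--         if best is not None and best > s:
--             hits += 1
--     return hits
--
--
-- def ovlp_scoring(
--         reference_list: ListOfEvents, hypothesis_list: ListOfEvents
-- ) -> Tuple[int, int, int]:
--     hit = _sweep_hits(reference_list, hypothesis_list)
--     miss = len(reference_list) - hit
--     fa = len(hypothesis_list) - _sweep_hits(hypothesis_list, reference_list)
--     return hit, miss, fa
-- ===== Notes on version B (the rewrite author's own statement) =====
-- stated objective: faster
-- what changed: Replaced A's all-pairs overlap scan (each event tested against every event of the other list) by sorting queries by stop and events by start and sweeping once with a pointer and a running maximum of event stops, so each hit/miss/false-alarm test is O(1) after the sorts.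
import Mathlib
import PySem

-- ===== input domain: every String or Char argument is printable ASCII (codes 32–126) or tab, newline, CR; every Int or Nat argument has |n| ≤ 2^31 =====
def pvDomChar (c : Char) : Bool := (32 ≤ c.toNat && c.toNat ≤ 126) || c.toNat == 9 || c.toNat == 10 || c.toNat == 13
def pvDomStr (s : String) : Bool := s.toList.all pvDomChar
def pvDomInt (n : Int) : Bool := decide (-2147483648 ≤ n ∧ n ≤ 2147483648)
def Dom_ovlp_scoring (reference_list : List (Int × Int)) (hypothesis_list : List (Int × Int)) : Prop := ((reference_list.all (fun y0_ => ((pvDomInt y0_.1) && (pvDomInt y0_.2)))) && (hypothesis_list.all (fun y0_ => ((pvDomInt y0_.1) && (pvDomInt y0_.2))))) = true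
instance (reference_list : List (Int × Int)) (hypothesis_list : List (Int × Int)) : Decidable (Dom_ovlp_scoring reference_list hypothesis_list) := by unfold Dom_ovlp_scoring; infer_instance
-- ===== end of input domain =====

-- B replaces A's all-pairs overlap test by sorting both lists and sweeping once with a running maximum (alternative algorithm).

-- ===== PORT A =====
def get_ovlp_events (start stop : Int) (event_list : List (Int × Int)) : List Int × List Int :=
  event_list.foldl
    (fun (acc : List Int × List Int) event =>
      if event.2 > start ∧ event.1 < stop then (acc.1 ++ [event.1], acc.2 ++ [event.2]) else acc)
    ([], [])

def ovlp_scoring (reference_list : List (Int × Int)) (hypothesis_list : List (Int × Int)) : Int × Int × Int :=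
  let hm := reference_list.foldl
    (fun (acc : Int × Int) event =>
      let starts := (get_ovlp_events event.1 event.2 hypothesis_list).1
      if starts.length > 0 then (acc.1 + 1, acc.2) else (acc.1, acc.2 + 1))
    (0, 0)
  let fa := hypothesis_list.foldl
    (fun (acc : Int) event =>
      let starts := (get_ovlp_events event.1 event.2 reference_list).1
      if starts.length = 0 then acc + 1 else acc)
    0
  (hm.1, hm.2, fa)

-- ===== PORT B =====
-- the inner `while j < len(ev) and ev[j][0] < e` loop of Source B (the pointer is the remaining suffix)
def pvAdvance (e : Int) : List (Int × Int) → Option Int → List (Int × Int) × Option Int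
  | [], best => ([], best)
  | (a, b) :: rest, best =>
    if a < e then
      pvAdvance e rest (some (match best with | none => b | some m => if b > m then b else m))
    else ((a, b) :: rest, best)

-- the `for s, e in qs` loop of Source B
def pvSweepLoop : List (Int × Int) → List (Int × Int) → Option Int → Int → Int
  | [], _, _, hits => hits
  | (s, e) :: qs, ev, best, hits =>
    let p := pvAdvance e ev best
    pvSweepLoop qs p.1 p.2
      (if (match p.2 with | none => false | some m => decide (m > s)) then hits + 1 else hits)

def pvSweepHits (queries events : List (Int × Int)) : Int :=
  pvSweepLoop (PySem.List.sorted queries (fun q => q.2) false)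
    (PySem.List.sorted events (fun x => x.1) false) none 0

def ovlp_scoring_alt (reference_list : List (Int × Int)) (hypothesis_list : List (Int × Int)) : Int × Int × Int :=
  let hit := pvSweepHits reference_list hypothesis_list
  (hit, (reference_list.length : Int) - hit,
    (hypothesis_list.length : Int) - pvSweepHits hypothesis_list reference_list)

-- ===== PRECONDITION & SPEC =====
def Spec_ovlp_scoring (reference_list : List (Int × Int)) (hypothesis_list : List (Int × Int)) (out : Int × Int × Int) : Prop := out = ovlp_scoring_alt reference_list hypothesis_list
instance (reference_list : List (Int × Int)) (hypothesis_list : List (Int × Int)) (out : Int × Int × Int) : Decidable (Spec_ovlp_scoring reference_list hypothesis_list out) := by unfold Spec_ovlp_scoring; infer_instance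

-- ===== CLAIM (what is proved, stated in full; the proofs are below) =====
def Claim_equal_ovlp_scoring : Prop := ∀ (reference_list : List (Int × Int)) (hypothesis_list : List (Int × Int)), Dom_ovlp_scoring reference_list hypothesis_list → Spec_ovlp_scoring reference_list hypothesis_list (ovlp_scoring reference_list hypothesis_list)

-- ===== LEMMAS AND PROOFS =====

-- A's overlap criterion: (s,e) overlaps some event of E
def pvOvl (E : List (Int × Int)) (q : Int × Int) : Bool :=
  E.any (fun x => decide (x.2 > q.1) && decide (x.1 < q.2))

-- Source B's hit test `best is not None and best > s`
def pvBestTest (best : Option Int) (s : Int) : Bool :=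
  match best with | none => false | some m => decide (m > s)

lemma get_fold (s e : Int) :
    ∀ (L : List (Int × Int)) (acc : List Int × List Int),
      L.foldl
        (fun (acc : List Int × List Int) event =>
          if event.2 > s ∧ event.1 < e then (acc.1 ++ [event.1], acc.2 ++ [event.2]) else acc) acc
      = (acc.1 ++ (L.filter (fun x => decide (x.2 > s) && decide (x.1 < e))).map Prod.fst,
         acc.2 ++ (L.filter (fun x => decide (x.2 > s) && decide (x.1 < e))).map Prod.snd) := by
  intro L
  induction L with
  | nil => intro acc; simp
  | cons h t ih =>
    intro acc
    by_cases hp : h.2 > s ∧ h.1 < e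
    · simp [List.foldl_cons, hp, ih]
    · rw [List.foldl_cons, if_neg hp, ih, List.filter_cons,
        if_neg (by simpa using hp)]

lemma get_len_pos (s e : Int) (L : List (Int × Int)) :
    ((get_ovlp_events s e L).1.length > 0) ↔ pvOvl L (s, e) = true := by
  simp only [get_ovlp_events, get_fold, pvOvl]
  simp [List.length_pos_iff, List.filter_eq_nil_iff, List.any_eq_true]

lemma hit_miss_fold (p : Int × Int → Bool) (H : List (Int × Int))
    (hp : ∀ q : Int × Int, ((get_ovlp_events q.1 q.2 H).1.length > 0) ↔ p q = true) :
    ∀ (rl : List (Int × Int)) (h0 m0 : Int),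
      rl.foldl
        (fun (acc : Int × Int) event =>
          let starts := (get_ovlp_events event.1 event.2 H).1
          if starts.length > 0 then (acc.1 + 1, acc.2) else (acc.1, acc.2 + 1)) (h0, m0)
      = (h0 + (rl.countP p : Int), m0 + ((rl.countP (fun q => !p q)) : Int)) := by
  intro rl
  induction rl with
  | nil => intro h0 m0; simp
  | cons q t ih =>
    intro h0 m0
    by_cases hq : p q = true
    · rw [List.foldl_cons, if_pos (by exact (hp q).mpr hq), ih]
      simp [hq, Prod.ext_iff]
      omega
    · rw [List.foldl_cons, if_neg (by rw [hp q]; simpa using hq), ih]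
      simp [hq, Prod.ext_iff]
      omega

lemma fa_fold (p : Int × Int → Bool) (R : List (Int × Int))
    (hp : ∀ q : Int × Int, ((get_ovlp_events q.1 q.2 R).1.length > 0) ↔ p q = true) :
    ∀ (hl : List (Int × Int)) (f0 : Int),
      hl.foldl
        (fun (acc : Int) event =>
          let starts := (get_ovlp_events event.1 event.2 R).1
          if starts.length = 0 then acc + 1 else acc) f0
      = f0 + ((hl.countP (fun q => !p q)) : Int) := by
  intro hl
  induction hl with
  | nil => intro f0; simp
  | cons q t ih =>
    intro f0
    by_cases hq : p q = true
    · rw [List.foldl_cons, if_neg (by have := (hp q).mpr hq; omega), ih]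
      simp [hq]
    · rw [List.foldl_cons, if_pos (by by_contra hne; exact hq ((hp q).mp (Nat.pos_of_ne_zero hne))), ih]
      simp [hq]
      ring

lemma bestTest_upd (best : Option Int) (b s : Int) :
    pvBestTest (some (match best with | none => b | some m => if b > m then b else m)) s
      = (pvBestTest best s || decide (b > s)) := by
  cases best with
  | none => simp [pvBestTest]
  | some m =>
    simp only [pvBestTest]
    by_cases h : b > m <;> simp [h] <;> omega

lemma advance_spec (e : Int) :
    ∀ (ev : List (Int × Int)) (best : Option Int),
      pvAdvance e ev best
        = (ev.dropWhile (fun x => decide (x.1 < e)),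
           (ev.takeWhile (fun x => decide (x.1 < e))).foldl
             (fun o x => some (match o with | none => x.2 | some m => if x.2 > m then x.2 else m)) best) := by
  intro ev
  induction ev with
  | nil => intro best; simp [pvAdvance]
  | cons h t ih =>
    intro best
    obtain ⟨a, b⟩ := h
    by_cases ha : a < e
    · simp [pvAdvance, ha, ih]
    · simp [pvAdvance, ha]

lemma bestTest_fold (s : Int) :
    ∀ (T : List (Int × Int)) (best : Option Int),
      pvBestTest (T.foldl
        (fun o x => some (match o with | none => x.2 | some m => if x.2 > m then x.2 else m)) best) s
        = (pvBestTest best s || T.any (fun x => decide (x.2 > s))) := by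
  intro T
  induction T with
  | nil => intro best; simp
  | cons h t ih =>
    intro best
    rw [List.foldl_cons, ih, bestTest_upd]
    simp [Bool.or_assoc]

lemma dropWhile_ge (e : Int) :
    ∀ (ev : List (Int × Int)), ev.Pairwise (fun x y => x.1 ≤ y.1) →
      ∀ x ∈ ev.dropWhile (fun x => decide (x.1 < e)), ¬ x.1 < e := by
  intro ev
  induction ev with
  | nil => simp
  | cons h t ih =>
    intro hp x hx
    rw [List.pairwise_cons] at hp
    by_cases hh : h.1 < e
    · rw [List.dropWhile_cons, if_pos (by simpa using hh)] at hx
      exact ih hp.2 x hx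
    · rw [List.dropWhile_cons, if_neg (by simpa using hh)] at hx
      rcases List.mem_cons.mp hx with rfl | hx
      · exact hh
      · have := hp.1 x hx; omega

lemma sweep_count :
    ∀ (qs ev C : List (Int × Int)) (best : Option Int) (hits : Int) (E : List (Int × Int)),
      (∀ s, pvBestTest best s = C.any (fun x => decide (x.2 > s))) →
      E.Perm (C ++ ev) →
      ev.Pairwise (fun x y => x.1 ≤ y.1) →
      qs.Pairwise (fun p q => p.2 ≤ q.2) →
      (∀ x ∈ C, ∀ q ∈ qs, x.1 < q.2) →
      pvSweepLoop qs ev best hits = hits + (qs.countP (pvOvl E) : Int) := by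
  intro qs
  induction qs with
  | nil => intro ev C best hits E _ _ _ _ _; simp [pvSweepLoop]
  | cons q qs ih =>
    intro ev C best hits E hbest hperm hev hqs hC
    obtain ⟨s, e⟩ := q
    rw [List.pairwise_cons] at hqs
    have hadv := advance_spec e ev
    have hstep : pvSweepLoop ((s, e) :: qs) ev best hits
        = pvSweepLoop qs (pvAdvance e ev best).1 (pvAdvance e ev best).2
            (if pvBestTest (pvAdvance e ev best).2 s then hits + 1 else hits) := rfl
    have hbest' : ∀ s', pvBestTest (pvAdvance e ev best).2 s'
        = (C ++ ev.takeWhile (fun x => decide (x.1 < e))).any (fun x => decide (x.2 > s')) := by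
      intro s'
      rw [hadv, bestTest_fold, hbest, List.any_append]
    have hCT_lt : ∀ x ∈ C ++ ev.takeWhile (fun x => decide (x.1 < e)), x.1 < e := by
      intro x hx
      rcases List.mem_append.mp hx with hx | hx
      · exact hC x hx (s, e) (by simp)
      · simpa using List.mem_takeWhile_imp hx
    have hev'_ge := dropWhile_ge e ev hev
    have hperm' : E.Perm ((C ++ ev.takeWhile (fun x => decide (x.1 < e)))
        ++ ev.dropWhile (fun x => decide (x.1 < e))) := by
      rw [List.append_assoc, List.takeWhile_append_dropWhile]; exact hperm
    have hhit : pvBestTest (pvAdvance e ev best).2 s = pvOvl E (s, e) := by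
      have lhs_iff : (((C ++ ev.takeWhile (fun x => decide (x.1 < e))).any
          (fun x => decide (x.2 > s))) = true)
          ↔ ∃ x ∈ C ++ ev.takeWhile (fun x => decide (x.1 < e)), x.2 > s := by
        simp [List.any_eq_true]
        constructor
        · rintro (⟨a, b, hab, hb⟩ | ⟨a, b, hab, hb⟩)
          · exact ⟨a, b, Or.inl hab, hb⟩
          · exact ⟨a, b, Or.inr hab, hb⟩
        · rintro ⟨a, b, hab | hab, hb⟩
          · exact Or.inl ⟨a, b, hab, hb⟩
          · exact Or.inr ⟨a, b, hab, hb⟩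
      have rhs_iff : (pvOvl E (s, e) = true)
          ↔ ∃ x ∈ (C ++ ev.takeWhile (fun x => decide (x.1 < e)))
              ++ ev.dropWhile (fun x => decide (x.1 < e)), x.2 > s ∧ x.1 < e := by
        simp only [pvOvl, List.any_eq_true, Bool.and_eq_true, decide_eq_true_eq, hperm'.mem_iff]
      rw [hbest', Bool.eq_iff_iff, lhs_iff, rhs_iff]
      constructor
      · rintro ⟨x, hx, h2⟩
        exact ⟨x, List.mem_append_left _ hx, h2, hCT_lt x hx⟩
      · rintro ⟨x, hx, h2, h1⟩
        rcases List.mem_append.mp hx with hx | hx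
        · exact ⟨x, hx, h2⟩
        · exact absurd h1 (hev'_ge x hx)
    rw [hstep, hhit]
    rw [ih (pvAdvance e ev best).1 (C ++ ev.takeWhile (fun x => decide (x.1 < e)))
          (pvAdvance e ev best).2 _ E hbest'
          (by rw [hadv]; exact hperm')
          (by rw [hadv]; exact hev.sublist (List.dropWhile_sublist _))
          hqs.2
          (by
            intro x hx q' hq'
            rcases List.mem_append.mp hx with hx | hx
            · exact hC x hx q' (List.mem_cons_of_mem _ hq')
            · have h1 : x.1 < e := by simpa using List.mem_takeWhile_imp hx
              have h2 : e ≤ q'.2 := hqs.1 q' hq'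
              omega)]
    simp only [List.countP_cons]
    by_cases ho : pvOvl E (s, e) = true
    · simp [ho]; ring
    · simp [ho]

lemma sweepHits_eq (Q Ev : List (Int × Int)) :
    pvSweepHits Q Ev = (Q.countP (pvOvl Ev) : Int) := by
  unfold pvSweepHits
  rw [sweep_count _ _ [] none 0 Ev
        (by intro s; simp [pvBestTest])
        (by simpa using (PySem.List.sorted_perm Ev (fun x => x.1) false).symm)
        (PySem.List.sorted_pairwise Ev (fun x => x.1))
        (PySem.List.sorted_pairwise Q (fun q => q.2))
        (by simp)]
  rw [(PySem.List.sorted_perm Q (fun q => q.2) false).countP_eq]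
  simp

-- ===== VERDICT (by name: the statement is the Claim_ definition above) =====
theorem ovlp_scoring_spec : Claim_equal_ovlp_scoring := by
  intro rl hl _
  unfold Spec_ovlp_scoring ovlp_scoring ovlp_scoring_alt
  simp only
  rw [hit_miss_fold (pvOvl hl) hl (fun q => get_len_pos q.1 q.2 hl) rl 0 0,
      fa_fold (pvOvl rl) rl (fun q => get_len_pos q.1 q.2 rl) hl 0,
      sweepHits_eq, sweepHits_eq]
  have h1 := List.length_eq_countP_add_countP (pvOvl hl) (l := rl)
  have h2 := List.length_eq_countP_add_countP (pvOvl rl) (l := hl)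
  have e1 : rl.countP (fun a => decide ¬pvOvl hl a = true) = rl.countP (fun q => !pvOvl hl q) := by
    apply List.countP_congr; intro x _; simp
  have e2 : hl.countP (fun a => decide ¬pvOvl rl a = true) = hl.countP (fun q => !pvOvl rl q) := by
    apply List.countP_congr; intro x _; simp
  rw [e1] at h1; rw [e2] at h2
  refine Prod.ext ?_ (Prod.ext ?_ ?_)
  · simp
  · simp only []
    omega
  · simp only []
    omega
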